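-- pv_equiv track=rewrite | github.com/lauraneckstein/jewishnewspapersstatistics | build_visualization.py | build_clergy_data
-- ===== SOURCE A (Python) =====
-- from collections import defaultdict, Counter
--
-- SHORT = {
--     "The Occident, and American Jewish Advocate": "Occident",
--     "The Israelite": "Israelite",
--     "The Jewish Messenger": "Messenger",
--     "The Weekly Gleaner": "Gleaner",
-- }
--
-- PAPERS = ["Occident", "Israelite", "Messenger", "Gleaner"]
--
-- def short(paper):
--     return SHORT.get(paper, paper)
--
-- def build_clergy_data(rows, all_years):
--     CLERGY_TYPES = {"Clergy", "Scholar", "Synagogue", "Organization", "Religious Organization"}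
--     clergy_year = defaultdict(Counter)
--     for r in rows:
--         st = r.get("Subscriber Type", "").strip()
--         yr = r["Year"].strip()
--         p = short(r["Newspaper_Name"])
--         if st in CLERGY_TYPES and yr and p:
--             clergy_year[p][yr] += 1
--     return {p: [clergy_year[p].get(y, 0) for y in all_years] for p in PAPERS}
-- ===== SOURCE B (Python) =====
-- SHORT = {
--     "The Occident, and American Jewish Advocate": "Occident",
--     "The Israelite": "Israelite",
--     "The Jewish Messenger": "Messenger",
--     "The Weekly Gleaner": "Gleaner",
-- }
--
-- PAPERS = ["Occident", "Israelite", "Messenger", "Gleaner"]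
--
-- def short(paper):
--     return SHORT.get(paper, paper)
--
-- def build_clergy_data(rows, all_years):
--     CLERGY_TYPES = {"Clergy", "Scholar", "Synagogue", "Organization", "Religious Organization"}
--
--     def hits(p, y):
--         if not y:
--             return 0
--         n = 0
--         for r in rows:
--             st = r.get("Subscriber Type", "").strip()
--             yr = r["Year"].strip()
--             paper = short(r["Newspaper_Name"])
--             if st in CLERGY_TYPES and yr == y and paper == p:
--                 n += 1
--         return n
--
--     return {p: [hits(p, y) for y in all_years] for p in PAPERS}
-- ===== Notes on version B (the rewrite author's own statement) =====
-- stated objective: alternative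
-- what changed: Replaces the two-phase tally (defaultdict of Counters filled in one pass, then indexed out per paper/year) with a direct per-cell count: for each paper and each year, one scan counts the matching rows; no intermediate counters are built.
import Mathlib
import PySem

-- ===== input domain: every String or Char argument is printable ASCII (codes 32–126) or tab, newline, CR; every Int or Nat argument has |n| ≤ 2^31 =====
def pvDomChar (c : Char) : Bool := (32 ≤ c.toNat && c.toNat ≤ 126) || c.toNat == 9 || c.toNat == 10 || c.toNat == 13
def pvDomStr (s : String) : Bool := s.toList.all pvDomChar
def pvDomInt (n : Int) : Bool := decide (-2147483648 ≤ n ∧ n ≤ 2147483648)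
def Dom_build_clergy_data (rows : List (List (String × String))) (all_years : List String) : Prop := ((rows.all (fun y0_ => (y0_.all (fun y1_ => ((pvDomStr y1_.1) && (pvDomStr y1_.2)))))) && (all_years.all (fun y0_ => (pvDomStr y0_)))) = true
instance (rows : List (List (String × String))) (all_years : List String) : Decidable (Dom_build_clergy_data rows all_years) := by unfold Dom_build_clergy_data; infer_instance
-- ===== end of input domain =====

-- B replaces A's two-phase tally (defaultdict-of-Counters, then index out) by a direct per-cell
-- count over the rows for each paper/year; an alternative decomposition, not claimed faster.


-- ===== PORT A =====
-- shared module constants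
def pvShortTable : PySem.Dict String String := PySem.Dict.ofList
  [("The Occident, and American Jewish Advocate", "Occident"),
   ("The Israelite", "Israelite"),
   ("The Jewish Messenger", "Messenger"),
   ("The Weekly Gleaner", "Gleaner")]

def pvShort (paper : String) : String := pvShortTable.getD paper paper

def pvPapers : List String := ["Occident", "Israelite", "Messenger", "Gleaner"]

def pvClergyTypes : PySem.Set String :=
  PySem.Set.ofList ["Clergy", "Scholar", "Synagogue", "Organization", "Religious Organization"]

-- loop body of A; r["Year"] / r["Newspaper_Name"] raise KeyError on a missing key:
-- those inputs are excluded by Pre_ below (the `.getD ""` default is never reached under Pre_).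
def pvStepA (d : PySem.Dict String (PySem.Dict String Int)) (r : List (String × String)) :
    PySem.Dict String (PySem.Dict String Int) :=
  let rd := PySem.Dict.mk r
  let st := PySem.Str.strip (rd.getD "Subscriber Type" "")
  let yr := PySem.Str.strip ((rd.get? "Year").getD "")
  let p := pvShort ((rd.get? "Newspaper_Name").getD "")
  if PySem.Set.contains pvClergyTypes st && !(yr == "") && !(p == "") then
    d.insert p ((d.getD p PySem.Dict.empty).modify yr 0 (· + 1))
  else d

def build_clergy_data (rows : List (List (String × String))) (all_years : List String) :
    List (String × List Int) :=
  let clergy_year := rows.foldl pvStepA PySem.Dict.empty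
  pvPapers.map (fun p =>
    (p, all_years.map (fun y => (clergy_year.getD p PySem.Dict.empty).getD y 0)))

-- ===== PORT B =====
-- B's row predicate: does row r count towards cell (p, y)?
def pvHitB (r : List (String × String)) (p y : String) : Bool :=
  let rd := PySem.Dict.mk r
  PySem.Set.contains pvClergyTypes (PySem.Str.strip (rd.getD "Subscriber Type" ""))
    && (PySem.Str.strip ((rd.get? "Year").getD "") == y)
    && (pvShort ((rd.get? "Newspaper_Name").getD "") == p)

def pvHits (rows : List (List (String × String))) (p y : String) : Int :=
  if y == "" then 0
  else rows.foldl (fun n r => if pvHitB r p y then n + 1 else n) 0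

def build_clergy_data_alt (rows : List (List (String × String))) (all_years : List String) :
    List (String × List Int) :=
  pvPapers.map (fun p => (p, all_years.map (fun y => pvHits rows p y)))

-- ===== PRECONDITION & SPEC =====
-- Pre_ excludes exactly the rows on which A (and B) raise KeyError: a row without a
-- "Year" or "Newspaper_Name" key.
def Pre_build_clergy_data (rows : List (List (String × String))) (all_years : List String) : Prop :=
  ∀ r ∈ rows, (PySem.Dict.mk r).contains "Year" = true ∧
              (PySem.Dict.mk r).contains "Newspaper_Name" = true
instance (rows : List (List (String × String))) (all_years : List String) : Decidable (Pre_build_clergy_data rows all_years) := by unfold Pre_build_clergy_data; infer_instance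

def pvWitness_build_clergy_data : (List (List (String × String))) × List String :=
  ([[("Year", "1851"), ("Newspaper_Name", "The Israelite"), ("Subscriber Type", " Clergy ")],
    [("Year", "1851"), ("Newspaper_Name", "The Weekly Gleaner")]],
   ["1850", "1851"])

def Spec_build_clergy_data (rows : List (List (String × String))) (all_years : List String) (out : List (String × List Int)) : Prop := out = build_clergy_data_alt rows all_years
instance (rows : List (List (String × String))) (all_years : List String) (out : List (String × List Int)) : Decidable (Spec_build_clergy_data rows all_years out) := by unfold Spec_build_clergy_data; infer_instance

-- ===== CLAIM (what is proved, stated in full; the proofs are below) =====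
def Claim_equal_build_clergy_data : Prop := ∀ (rows : List (List (String × String))) (all_years : List String), Dom_build_clergy_data rows all_years → Pre_build_clergy_data rows all_years → Spec_build_clergy_data rows all_years (build_clergy_data rows all_years)

-- ===== LEMMAS AND PROOFS =====

-- one loop step of A, stated over the already-extracted row fields st/yr/pr, for a cell (p, y)
-- with p ≠ "" and y ≠ "": the cell grows by 1 exactly when the row hits it.
theorem pv_step_core (d : PySem.Dict String (PySem.Dict String Int)) (st yr pr p y : String)
    (hp : p ≠ "") (hy : y ≠ "") :
    ((if pvClergyTypes.contains st && !(yr == "") && !(pr == "") then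
        d.insert pr ((d.getD pr PySem.Dict.empty).modify yr 0 (· + 1))
      else d).getD p PySem.Dict.empty).getD y 0
      = (d.getD p PySem.Dict.empty).getD y 0
        + (if pvClergyTypes.contains st && (yr == y) && (pr == p) then 1 else 0) := by
  by_cases hc : st ∈ pvClergyTypes
  · by_cases h1 : yr = ""
    · subst h1
      simp [Ne.symm hy]
    · by_cases h3 : pr = p
      · subst h3
        rw [if_pos (by simp [hc, h1, hp])]
        simp [PySem.Dict.getD_modify]
        by_cases h4 : yr = y
        · subst h4; simp [hc]
        · simp [h4, Ne.symm h4]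
      · by_cases h2 : pr = ""
        · simp [hc, h2, hp]
        · rw [if_pos (by simp [hc, h1, h2])]
          simp [PySem.Dict.getD_insert, h3, Ne.symm h3]
  · simp [hc]

-- the same step never touches the "" year column (A only records nonempty stripped years).
theorem pv_step_core_empty (d : PySem.Dict String (PySem.Dict String Int)) (st yr pr p : String) :
    ((if pvClergyTypes.contains st && !(yr == "") && !(pr == "") then
        d.insert pr ((d.getD pr PySem.Dict.empty).modify yr 0 (· + 1))
      else d).getD p PySem.Dict.empty).getD "" 0
      = (d.getD p PySem.Dict.empty).getD "" 0 := by
  split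
  · next h =>
    have hyr : yr ≠ "" := by
      simp only [Bool.and_eq_true, Bool.not_eq_true', beq_eq_false_iff_ne, ne_eq] at h
      exact h.1.2
    by_cases hpp : p = pr
    · subst hpp
      simp [PySem.Dict.getD_modify, Ne.symm hyr]
    · simp [PySem.Dict.getD_insert, hpp]
  · rfl

theorem pv_cell_step (d : PySem.Dict String (PySem.Dict String Int))
    (r : List (String × String)) (p y : String) (hp : p ≠ "") (hy : y ≠ "") :
    ((pvStepA d r).getD p PySem.Dict.empty).getD y 0
      = (d.getD p PySem.Dict.empty).getD y 0 + (if pvHitB r p y then 1 else 0) :=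
  pv_step_core d _ _ _ p y hp hy

theorem pv_cell_foldl (rows : List (List (String × String)))
    (d : PySem.Dict String (PySem.Dict String Int)) (p y : String) (hp : p ≠ "") (hy : y ≠ "") :
    ((rows.foldl pvStepA d).getD p PySem.Dict.empty).getD y 0
      = (d.getD p PySem.Dict.empty).getD y 0 + (rows.countP (fun r => pvHitB r p y) : Int) := by
  induction rows generalizing d with
  | nil => simp
  | cons r rs ih =>
    simp only [List.foldl_cons, List.countP_cons]
    rw [ih (pvStepA d r), pv_cell_step d r p y hp hy]
    push_cast
    omega

theorem pv_cell_step_empty (d : PySem.Dict String (PySem.Dict String Int))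
    (r : List (String × String)) (p : String) :
    ((pvStepA d r).getD p PySem.Dict.empty).getD "" 0
      = (d.getD p PySem.Dict.empty).getD "" 0 :=
  pv_step_core_empty d _ _ _ p

theorem pv_cell_foldl_empty (rows : List (List (String × String)))
    (d : PySem.Dict String (PySem.Dict String Int)) (p : String) :
    ((rows.foldl pvStepA d).getD p PySem.Dict.empty).getD "" 0
      = (d.getD p PySem.Dict.empty).getD "" 0 := by
  induction rows generalizing d with
  | nil => rfl
  | cons r rs ih =>
    simp only [List.foldl_cons]
    rw [ih (pvStepA d r), pv_cell_step_empty]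

-- B's inner loop is a countP (PySem.List.foldl_count_if).
theorem pv_hits_eq (rows : List (List (String × String))) (p y : String) (hy : y ≠ "") :
    pvHits rows p y = (rows.countP (fun r => pvHitB r p y) : Int) := by
  unfold pvHits
  rw [if_neg (by simpa using hy), PySem.List.foldl_count_if (fun r => pvHitB r p y) rows 0]
  simp

-- ===== VERDICT (by name: the statement is the Claim_ definition above) =====
theorem build_clergy_data_spec : Claim_equal_build_clergy_data := by
  intro rows all_years _ _
  unfold Spec_build_clergy_data build_clergy_data build_clergy_data_alt
  apply List.map_congr_left
  intro p hpmem
  have hp : p ≠ "" := by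
    simp only [pvPapers, List.mem_cons, List.not_mem_nil, or_false] at hpmem
    rcases hpmem with rfl | rfl | rfl | rfl <;> decide
  congr 1
  apply List.map_congr_left
  intro y _
  by_cases hy : y = ""
  · subst hy
    rw [pv_cell_foldl_empty]
    simp [pvHits, PySem.Dict.getD_empty]
  · rw [pv_cell_foldl rows PySem.Dict.empty p y hp hy, pv_hits_eq rows p y hy]
    simp [PySem.Dict.getD_empty]
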